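-- pv_equiv track=rewrite | github.com/furkanercan/POCO | src/lib/supp/create_decoding_schedule.py | embed_frozen_nodes
-- ===== SOURCE A (Python) =====
-- def embed_frozen_nodes(vec_sch, vec_frozen):
--     j = 0
--     for i in range(len(vec_sch)):
--         if(vec_sch[i] == 'H'):
--             if(vec_frozen[j] == 0):
--                 vec_sch[i] = 'I' #I for info, H for frozen
--             j+=1
--     return vec_sch
-- ===== SOURCE B (Python) =====
-- def embed_frozen_nodes(vec_sch, vec_frozen):
--     # Flag-driven search: iterate over the frozen flags and locate each next 'H'
--     # by an index search from just past the previous hit; stop when no 'H' remains.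
--     # Mutates vec_sch in place like the original.
--     start = 0
--     for f in vec_frozen:
--         try:
--             i = vec_sch.index('H', start)
--         except ValueError:
--             break
--         if f == 0:
--             vec_sch[i] = 'I'
--         start = i + 1
--     return vec_sch
-- ===== Notes on version B (the rewrite author's own statement) =====
-- stated objective: alternative
-- what changed: A scans every schedule position with an index loop and a manual frozen-bit counter; B is flag-driven: it iterates over vec_frozen and locates each successive 'H' by an index search (list.index('H', start)), stopping when no 'H' remains, so the matching counter j disappears entirely.
import Mathlib
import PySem

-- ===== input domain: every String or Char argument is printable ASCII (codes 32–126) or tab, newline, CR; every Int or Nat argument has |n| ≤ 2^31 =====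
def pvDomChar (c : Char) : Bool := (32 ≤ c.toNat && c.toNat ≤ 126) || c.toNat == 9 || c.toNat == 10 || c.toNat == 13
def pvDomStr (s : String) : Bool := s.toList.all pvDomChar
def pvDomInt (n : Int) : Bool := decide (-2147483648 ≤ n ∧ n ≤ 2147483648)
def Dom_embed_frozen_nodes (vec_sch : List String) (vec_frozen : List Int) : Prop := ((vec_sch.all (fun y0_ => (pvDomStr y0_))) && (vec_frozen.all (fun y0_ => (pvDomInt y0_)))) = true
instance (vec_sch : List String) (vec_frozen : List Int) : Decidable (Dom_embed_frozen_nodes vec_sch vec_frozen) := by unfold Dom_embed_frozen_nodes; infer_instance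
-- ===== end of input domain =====

-- B replaces A's position scan with a manual frozen-bit counter by a flag-driven loop
-- that locates each next 'H' via an index search; equivalence is about the return value
-- (both Pythons mutate vec_sch in place).

-- ===== PORT A =====
-- literal port of A's loop body: state (vec, j); where Python's vec_frozen[j] would raise
-- IndexError (pyGet? = none, excluded by Pre_) the port keeps the entry and increments j.
def stepA (vec_frozen : List Int) (st : List String × Int) (i : Int) : List String × Int :=
  if PySem.List.pyGet? st.1 i == some "H" then
    ((if PySem.List.pyGet? vec_frozen st.2 == some 0 then PySem.List.pySetD st.1 i "I" else st.1),
     st.2 + 1)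
  else st

def embed_frozen_nodes (vec_sch : List String) (vec_frozen : List Int) : List String :=
  ((PySem.List.pyRange 0 ((vec_sch.length : Int)) 1).foldl (stepA vec_frozen)
    (vec_sch, (0 : Int))).1

-- ===== PORT B =====
-- hand port of Python's vec.index('H', start) for 0 ≤ start (exact there; none = ValueError,
-- which B's try/except turns into the broken-out state `none`).
def findHFrom : List String → Int → Int → Option Int
  | [], _, _ => none
  | c :: cs, idx, start =>
      if start ≤ idx ∧ c = "H" then some idx else findHFrom cs (idx + 1) start

-- B's loop body: state (vec, some start), or (vec, none) once the search failed (break)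
def stepB (st : List String × Option Int) (f : Int) : List String × Option Int :=
  match st.2 with
  | none => st
  | some start =>
    match findHFrom st.1 0 start with
    | none => (st.1, none)
    | some i => ((if f == 0 then PySem.List.pySetD st.1 i "I" else st.1), some (i + 1))

def embed_frozen_nodes_alt (vec_sch : List String) (vec_frozen : List Int) : List String :=
  (vec_frozen.foldl stepB (vec_sch, some (0 : Int))).1

-- ===== PRECONDITION & SPEC =====
-- Pre_ excludes exactly the inputs where Python A raises IndexError: more 'H'
-- entries in vec_sch than entries in vec_frozen (B simply stops consuming flags there).
def Pre_embed_frozen_nodes (vec_sch : List String) (vec_frozen : List Int) : Prop :=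
  vec_sch.count "H" ≤ vec_frozen.length
instance (vec_sch : List String) (vec_frozen : List Int) : Decidable (Pre_embed_frozen_nodes vec_sch vec_frozen) := by unfold Pre_embed_frozen_nodes; infer_instance

def pvWitness_embed_frozen_nodes : List String × List Int := (["H", "N", "H"], [0, 1])

def Spec_embed_frozen_nodes (vec_sch : List String) (vec_frozen : List Int) (out : List String) : Prop := out = embed_frozen_nodes_alt vec_sch vec_frozen
instance (vec_sch : List String) (vec_frozen : List Int) (out : List String) : Decidable (Spec_embed_frozen_nodes vec_sch vec_frozen out) := by unfold Spec_embed_frozen_nodes; infer_instance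

-- ===== CLAIM (what is proved, stated in full; the proofs are below) =====
def Claim_equal_embed_frozen_nodes : Prop := ∀ (vec_sch : List String) (vec_frozen : List Int), Dom_embed_frozen_nodes vec_sch vec_frozen → Pre_embed_frozen_nodes vec_sch vec_frozen → Spec_embed_frozen_nodes vec_sch vec_frozen (embed_frozen_nodes vec_sch vec_frozen)


-- ===== LEMMAS AND PROOFS =====

-- common functional specification: walk the schedule, consuming one flag per "H"
-- (an "H" past the end of the flag list stays untouched — both ports do that).
def mark : List String → List Int → List String
  | [], _ => []
  | c :: cs, fs =>
      if c = "H" then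
        match fs with
        | [] => c :: mark cs []
        | f :: fs' => (if f = 0 then "I" else c) :: mark cs fs'
      else c :: mark cs fs

-- index of the first "H"
def firstH : List String → Option Nat
  | [] => none
  | c :: cs => if c = "H" then some 0 else (firstH cs).map (· + 1)

lemma mark_nil : ∀ cs : List String, mark cs [] = cs := by
  intro cs; induction cs with
  | nil => rfl
  | cons c cs ih => by_cases h : c = "H" <;> simp [mark, h, ih]

lemma mark_no_H : ∀ (cs : List String), firstH cs = none → ∀ fs, mark cs fs = cs := by
  intro cs; induction cs with
  | nil => intro _ _; rfl
  | cons c cs ih =>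
      intro h fs
      by_cases hc : c = "H"
      · simp [firstH, hc] at h
      · simp [firstH, hc] at h
        simp [mark, hc, ih h]

lemma mark_split : ∀ (u : List String) (v : List String) (f : Int) (fs : List Int),
    "H" ∉ u →
    mark (u ++ "H" :: v) (f :: fs) = u ++ (if f = 0 then "I" else "H") :: mark v fs := by
  intro u; induction u with
  | nil => intro v f fs _; simp [mark]
  | cons c u ih =>
      intro v f fs h
      have hc : c ≠ "H" := fun hh => h (by simp [hh])
      have hu : "H" ∉ u := fun hh => h (by simp [hh])
      simp [mark, hc, ih v f fs hu]

lemma firstH_split : ∀ (cs : List String) (k : Nat), firstH cs = some k →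
    ∃ u v, cs = u ++ "H" :: v ∧ u.length = k ∧ "H" ∉ u := by
  intro cs; induction cs with
  | nil => intro k h; simp [firstH] at h
  | cons c cs ih =>
      intro k h
      by_cases hc : c = "H"
      · have hk : k = 0 := by simp [firstH, hc] at h; omega
        exact ⟨[], cs, by simp [hc], by simp [hk], by simp⟩
      · simp [firstH, hc] at h
        obtain ⟨k', hk', rfl⟩ := h
        obtain ⟨u, v, rfl, hlen, hnot⟩ := ih k' hk'
        refine ⟨c :: u, v, rfl, by simp [hlen], ?_⟩
        intro hm
        rcases List.mem_cons.mp hm with h1 | h1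
        · exact hc h1.symm
        · exact hnot h1

lemma findHFrom_ge : ∀ (cs : List String) (a s : Int), s ≤ a →
    findHFrom cs a s = Option.map (fun (k : Nat) => a + (k : Int)) (firstH cs) := by
  intro cs; induction cs with
  | nil => intro a s _; rfl
  | cons c cs ih =>
      intro a s hs
      by_cases hc : c = "H"
      · simp [findHFrom, firstH, hc, hs]
      · rw [show findHFrom (c :: cs) a s = findHFrom cs (a + 1) s from
            if_neg (fun h => hc h.2)]
        rw [ih (a + 1) s (by omega)]
        simp only [firstH, if_neg hc]
        cases firstH cs with
        | none => simp
        | some k => simp; ring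

lemma findHFrom_append : ∀ (pre cs : List String) (a : Int),
    findHFrom (pre ++ cs) a (a + (pre.length : Int))
      = Option.map (fun (k : Nat) => a + (pre.length : Int) + (k : Int)) (firstH cs) := by
  intro pre; induction pre with
  | nil =>
      intro cs a; simpa using findHFrom_ge cs a a le_rfl
  | cons p pre ih =>
      intro cs a
      have hlt : ¬ (a + (((p :: pre).length : Nat) : Int) ≤ a ∧ p = "H") := by
        rintro ⟨h1, -⟩
        have h2 : (0 : Int) < (((p :: pre).length : Nat) : Int) := by
          simp only [List.length_cons]; push_cast; omega
        linarith
      rw [show findHFrom ((p :: pre) ++ cs) a (a + ((p :: pre).length : Int))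
            = findHFrom (pre ++ cs) (a + 1) (a + ((p :: pre).length : Int)) from if_neg hlt]
      have harg : a + ((p :: pre).length : Int) = (a + 1) + (pre.length : Int) := by
        simp; ring
      rw [harg, ih cs (a + 1)]

lemma set_append_length {α : Type} : ∀ (xs : List α) (y : α) (ys : List α) (v : α),
    (xs ++ y :: ys).set xs.length v = xs ++ v :: ys := by
  intro xs; induction xs with
  | nil => intro y ys v; rfl
  | cons x xs ih => intro y ys v; simp [ih]

lemma stepB_none_of (vec : List String) (s f : Int) (h : findHFrom vec 0 s = none) :
    stepB (vec, some s) f = (vec, none) := by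
  rw [show stepB (vec, some s) f
      = (match findHFrom vec 0 s with
         | none => ((vec, none) : List String × Option Int)
         | some i => ((if f == 0 then PySem.List.pySetD vec i "I" else vec), some (i + 1)))
      from rfl, h]

lemma stepB_some_of (vec : List String) (s f i : Int) (h : findHFrom vec 0 s = some i) :
    stepB (vec, some s) f
      = ((if f == 0 then PySem.List.pySetD vec i "I" else vec), some (i + 1)) := by
  rw [show stepB (vec, some s) f
      = (match findHFrom vec 0 s with
         | none => ((vec, none) : List String × Option Int)
         | some i => ((if f == 0 then PySem.List.pySetD vec i "I" else vec), some (i + 1)))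
      from rfl, h]

-- B's fold with the broken-out state returns the vector unchanged
lemma B_none : ∀ (fs : List Int) (vec : List String),
    (fs.foldl stepB (vec, (none : Option Int))).1 = vec := by
  intro fs; induction fs with
  | nil => intro vec; rfl
  | cons f fs ih => intro vec; simpa [stepB] using ih vec

lemma B_go : ∀ (fs : List Int) (cs pre : List String),
    (fs.foldl stepB (pre ++ cs, some ((pre.length : Nat) : Int))).1 = pre ++ mark cs fs := by
  intro fs; induction fs with
  | nil => intro cs pre; simp [mark_nil]
  | cons f fs ih =>
      intro cs pre
      have hfind := findHFrom_append pre cs 0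
      simp only [zero_add] at hfind
      rw [List.foldl_cons]
      cases hfh : firstH cs with
      | none =>
          rw [hfh] at hfind
          simp at hfind
          rw [stepB_none_of _ _ f hfind, B_none, mark_no_H cs hfh]
      | some k =>
          rw [hfh] at hfind
          simp at hfind
          obtain ⟨u, v, rfl, hlen, hnot⟩ := firstH_split cs k hfh
          subst hlen
          rw [stepB_some_of _ _ f _ hfind]
          have hset : PySem.List.pySetD (pre ++ (u ++ "H" :: v))
              (((pre.length : Nat) : Int) + ((u.length : Nat) : Int)) "I"
              = pre ++ (u ++ "I" :: v) := by
            rw [show ((pre.length : Nat) : Int) + ((u.length : Nat) : Int)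
                = (((pre ++ u).length : Nat) : Int) by simp,
              PySem.List.pySetD_natCast,
              show pre ++ (u ++ "H" :: v) = (pre ++ u) ++ "H" :: v by simp,
              set_append_length]
            simp
          have hvec : (if f == 0 then
                PySem.List.pySetD (pre ++ (u ++ "H" :: v))
                  (((pre.length : Nat) : Int) + ((u.length : Nat) : Int)) "I"
              else pre ++ (u ++ "H" :: v))
              = (pre ++ u ++ [if f = 0 then "I" else "H"]) ++ v := by
            by_cases hf : f = 0 <;> simp [hf, hset]
          rw [hvec]
          have hstart : ((pre.length : Nat) : Int) + ((u.length : Nat) : Int) + 1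
              = (((pre ++ u ++ [if f = 0 then "I" else "H"]).length : Nat) : Int) := by
            simp only [List.length_append, List.length_cons, List.length_nil]
            push_cast
            ring
          rw [hstart, ih v (pre ++ u ++ [if f = 0 then "I" else "H"]),
              mark_split u v f fs hnot]
          simp

-- A's fold computes mark of the suffix, one schedule position per range index
lemma A_go (E : List Int) : ∀ (cs pre : List String) (j : Nat),
    ((PySem.List.pyRange ((pre.length : Nat) : Int)
        (((pre.length : Nat) : Int) + ((cs.length : Nat) : Int)) 1).foldl (stepA E)
      (pre ++ cs, ((j : Nat) : Int))).1 = pre ++ mark cs (E.drop j) := by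
  intro cs; induction cs with
  | nil =>
      intro pre j
      rw [PySem.List.pyRange_one_eq_nil (by simp)]
      simp [mark]
  | cons c cs ih =>
      intro pre j
      have hb : ((pre.length : Nat) : Int) < ((pre.length : Nat) : Int) + (((c :: cs).length : Nat) : Int) := by
        simp
      rw [PySem.List.pyRange_one_cons hb, List.foldl_cons]
      have hup : ∀ x : String, ((pre.length : Nat) : Int) + (((c :: cs).length : Nat) : Int)
          = (((pre ++ [x]).length : Nat) : Int) + ((cs.length : Nat) : Int) := by
        intro x
        simp only [List.length_append, List.length_cons, List.length_nil]
        push_cast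
        ring
      have hlo : ∀ x : String, ((pre.length : Nat) : Int) + 1 = (((pre ++ [x]).length : Nat) : Int) := by
        intro x; simp
      by_cases hc : c = "H"
      · subst hc
        have hgetE : PySem.List.pyGet? E ((j : Nat) : Int) = E[j]? := PySem.List.pyGet?_natCast E j
        cases hE : E.drop j with
        | nil =>
            have hjlen : E.length ≤ j := List.drop_eq_nil_iff.mp hE
            have hnone : E[j]? = none := List.getElem?_eq_none hjlen
            have hstep : stepA E (pre ++ "H" :: cs, ((j : Nat) : Int)) ((pre.length : Nat) : Int)
                = (pre ++ "H" :: cs, ((j : Nat) : Int) + 1) := by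
              simp [stepA, hgetE, hnone]
            have hj1 : ((j : Nat) : Int) + 1 = (((j + 1 : Nat) : Nat) : Int) := by push_cast; ring
            rw [hstep, hj1, hup "H", hlo "H",
                show pre ++ "H" :: cs = (pre ++ ["H"]) ++ cs by simp,
                ih (pre ++ ["H"]) (j + 1)]
            have hd1 : E.drop (j + 1) = [] := List.drop_eq_nil_iff.mpr (by omega)
            rw [hd1]
            simp [mark]
        | cons f fs' =>
            have hsome : E[j]? = some f := by
              rw [← List.head?_drop, hE]; rfl
            have hd1 : E.drop (j + 1) = fs' := by
              rw [← List.tail_drop, hE]; rfl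
            have hj1 : ((j : Nat) : Int) + 1 = (((j + 1 : Nat) : Nat) : Int) := by push_cast; ring
            by_cases hf : f = 0
            · have hset : PySem.List.pySetD (pre ++ "H" :: cs) ((pre.length : Nat) : Int) "I"
                  = pre ++ "I" :: cs := by
                rw [PySem.List.pySetD_natCast, set_append_length]
              have hstep : stepA E (pre ++ "H" :: cs, ((j : Nat) : Int)) ((pre.length : Nat) : Int)
                  = (pre ++ "I" :: cs, ((j : Nat) : Int) + 1) := by
                simp [stepA, hgetE, hsome, hf, hset]
              rw [hstep, hj1, hup "I", hlo "I",
                  show pre ++ "I" :: cs = (pre ++ ["I"]) ++ cs by simp,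
                  ih (pre ++ ["I"]) (j + 1), hd1]
              simp [mark, hf]
            · have hstep : stepA E (pre ++ "H" :: cs, ((j : Nat) : Int)) ((pre.length : Nat) : Int)
                  = (pre ++ "H" :: cs, ((j : Nat) : Int) + 1) := by
                simp [stepA, hgetE, hsome, hf]
              rw [hstep, hj1, hup "H", hlo "H",
                  show pre ++ "H" :: cs = (pre ++ ["H"]) ++ cs by simp,
                  ih (pre ++ ["H"]) (j + 1), hd1]
              simp [mark, hf]
      · have hstep : stepA E (pre ++ c :: cs, ((j : Nat) : Int)) ((pre.length : Nat) : Int)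
            = (pre ++ c :: cs, ((j : Nat) : Int)) := by
          simp [stepA, hc]
        rw [hstep, hup c, hlo c,
            show pre ++ c :: cs = (pre ++ [c]) ++ cs by simp,
            ih (pre ++ [c]) j]
        simp [mark, hc]

-- ===== VERDICT (by name: the statement is the Claim_ definition above) =====
theorem embed_frozen_nodes_spec : Claim_equal_embed_frozen_nodes := by
  intro vec_sch vec_frozen _ _
  unfold Spec_embed_frozen_nodes embed_frozen_nodes embed_frozen_nodes_alt
  have hA := A_go vec_frozen vec_sch [] 0
  have hB := B_go vec_frozen vec_sch []
  simp only [List.nil_append, List.length_nil, Nat.cast_zero, zero_add, List.drop_zero] at hA hB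
  rw [hA, hB]
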